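-- pv_equiv track=rewrite | github.com/Sharninjak/python | opt.py | xor_process
-- ===== SOURCE A (Python) =====
-- def to_two(content):
--     content_two = []
--     for i in content:
--         n = []
--         for j in i:
--             # ord():character->unicode  bin():integer->binary
--             j = bin(ord(j)).replace('0b', '')
--             n.append(j)
--         content_two.append(n)
--     return content_two
--
-- def two_return(content_two):
--     content_return = []
--     for i in content_two:
--         n = ''
--         for j in i:
--             j = ''.join([chr(int(j, 2))])
--             n += j
--         content_return.append(n)
--     return content_return
--
-- def xor_process(reference, change):
--     # 内容变为二进制数据
--     reference_two = to_two(reference)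
--     change_two = to_two(change)
--
--     # 进行异或
--     text_return = []
--     for i in range(len(reference_two)):
--         tip = []
--         for j in range(len(reference_two[i])):
--             # ^ 需要数据位int（10进制）类型
--             #  结果为字符串形式
--             k = bin(int(reference_two[i][j], 2) ^ int(change_two[i][j], 2))[2:]
--             tip.append(k)
--         text_return.append(tip)
--
--     # 返回异或后的内容
--     return two_return(text_return)
-- ===== SOURCE B (Python) =====
-- def xor_process(reference, change):
--     # One pass: XOR corresponding characters directly, no binary-string representation.
--     return [''.join(chr(ord(a) ^ ord(b)) for a, b in zip(r, c))
--             for r, c in zip(reference, change)]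
-- ===== Notes on version B (the rewrite author's own statement) =====
-- stated objective: simpler
-- what changed: Replaced A's three-pass pipeline through a binary-string table (chars -> bin() strings, index-loop XOR of reparsed ints producing new bin() strings, strings -> chars) by a single zip-based pass that XORs character codes directly; Pre_ excludes mismatched-length inputs, on which A raises IndexError except in the accidental all-trailing-empty corner where A keeps the untouched empty strings and B's zip truncates.
-- outside the precondition, e.g. on xor_process(['', ''], []): A returns ['', ''], B returns []
import Mathlib
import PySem

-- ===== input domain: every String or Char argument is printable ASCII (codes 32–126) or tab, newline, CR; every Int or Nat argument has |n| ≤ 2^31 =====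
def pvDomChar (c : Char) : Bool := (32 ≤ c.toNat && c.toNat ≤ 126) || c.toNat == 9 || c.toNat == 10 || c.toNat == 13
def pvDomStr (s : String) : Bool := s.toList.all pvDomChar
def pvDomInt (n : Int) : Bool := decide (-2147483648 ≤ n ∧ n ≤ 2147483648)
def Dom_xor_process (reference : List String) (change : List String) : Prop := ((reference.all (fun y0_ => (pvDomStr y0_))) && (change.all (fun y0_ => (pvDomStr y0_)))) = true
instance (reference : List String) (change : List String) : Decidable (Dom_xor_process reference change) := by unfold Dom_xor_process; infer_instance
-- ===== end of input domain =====

set_option maxRecDepth 10000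

-- B drops the binary-string intermediate representation and three helper passes of A
-- and XORs corresponding characters directly in one zip-based pass (simpler).


-- ===== PORT A =====
-- bin(ord(j)).replace('0b', '') per character; appends become List.map
def to_two (content : List String) : List (List String) :=
  content.map (fun i => i.toList.map (fun j =>
    PySem.Str.replace (PySem.Int.pyBin (j.toNat : Int)) "0b" ""))

-- chr(int(j, 2)); int(_, 2) never raises here (its argument is always a bin() output),
-- so the unreachable none-branch is defaulted with getD 0
def two_return (content_two : List (List String)) : List String :=
  content_two.map (fun i => String.mk (i.map (fun j =>
    Char.ofNat ((PySem.Int.ofStrBase? j 2).getD 0).toNat)))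

-- index loops over range(len(..)); the pyGetD defaults are unreachable inside Pre_
def xor_process (reference : List String) (change : List String) : List String :=
  let reference_two := to_two reference
  let change_two := to_two change
  let text_return := (PySem.List.pyRange 0 (reference_two.length : Int) 1).map (fun i =>
    (PySem.List.pyRange 0 ((PySem.List.pyGetD reference_two i []).length : Int) 1).map (fun j =>
      PySem.Str.slice (PySem.Int.pyBin (PySem.Int.bxor
        ((PySem.Int.ofStrBase? (PySem.List.pyGetD (PySem.List.pyGetD reference_two i []) j "") 2).getD 0)
        ((PySem.Int.ofStrBase? (PySem.List.pyGetD (PySem.List.pyGetD change_two i []) j "") 2).getD 0)))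
        (some 2) none))
  two_return text_return

-- ===== PORT B =====
def xor_process_alt (reference : List String) (change : List String) : List String :=
  (reference.zip change).map (fun p =>
    String.mk ((p.1.toList.zip p.2.toList).map (fun q =>
      Char.ofNat (q.1.toNat ^^^ q.2.toNat))))

-- ===== PRECONDITION & SPEC =====
-- Pre_ excludes the mismatched-length inputs (change shorter than reference, or some
-- change[i] shorter than reference[i]): there A raises IndexError, except in the corner
-- where every reference entry beyond change's length is the empty string, where A never
-- touches the missing change entries and returns those empty strings unchanged while B's
-- zip truncates — mismatched lengths are an unspecified corner and both values are defensible.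
def Pre_xor_process (reference : List String) (change : List String) : Prop :=
  reference.length ≤ change.length ∧
  ∀ p ∈ reference.zip change, p.1.toList.length ≤ p.2.toList.length
instance (reference : List String) (change : List String) : Decidable (Pre_xor_process reference change) := by unfold Pre_xor_process; infer_instance

def pvWitness_xor_process : List String × List String := (["ab", "c"], ["xy", "zz"])

def Spec_xor_process (reference : List String) (change : List String) (out : List String) : Prop := out = xor_process_alt reference change
instance (reference : List String) (change : List String) (out : List String) : Decidable (Spec_xor_process reference change out) := by unfold Spec_xor_process; infer_instance

-- ===== CLAIM (what is proved, stated in full; the proofs are below) =====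
def Claim_equal_xor_process : Prop := ∀ (reference : List String) (change : List String), Dom_xor_process reference change → Pre_xor_process reference change → Spec_xor_process reference change (xor_process reference change)


-- ===== LEMMAS AND PROOFS =====

-- roundtrip of A's two binary-string conversions, checked on the by-Dom-finite code range
theorem parse_replace_bin_list : ∀ x ∈ List.range 128,
    ((PySem.Int.ofStrBase? (PySem.Str.replace (PySem.Int.pyBin (x:Int)) "0b" "") 2).getD 0) = (x:Int) := by
  decide

theorem parse_slice_bin_list : ∀ x ∈ List.range 128,
    ((PySem.Int.ofStrBase? (PySem.Str.slice (PySem.Int.pyBin (x:Int)) (some 2) none) 2).getD 0) = (x:Int) := by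
  decide

theorem parse_replace_bin (x : Nat) (hx : x < 128) :
    ((PySem.Int.ofStrBase? (PySem.Str.replace (PySem.Int.pyBin (x:Int)) "0b" "") 2).getD 0) = (x:Int) :=
  parse_replace_bin_list x (List.mem_range.mpr hx)

theorem parse_slice_bin (x : Nat) (hx : x < 128) :
    ((PySem.Int.ofStrBase? (PySem.Str.slice (PySem.Int.pyBin (x:Int)) (some 2) none) 2).getD 0) = (x:Int) :=
  parse_slice_bin_list x (List.mem_range.mpr hx)

theorem dom_char_lt (s : String) (hs : pvDomStr s = true) (ch : Char) (hch : ch ∈ s.toList) :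
    ch.toNat < 128 := by
  have := List.all_eq_true.mp hs ch hch
  simp [pvDomChar] at this
  omega

-- ===== VERDICT (by name: the statement is the Claim_ definition above) =====
theorem xor_process_spec : Claim_equal_xor_process := by
  unfold Claim_equal_xor_process
  intro rs cs hdom hpre
  unfold Spec_xor_process
  obtain ⟨hlen, hinner⟩ := hpre
  simp only [Dom_xor_process, Bool.and_eq_true, List.all_eq_true] at hdom
  obtain ⟨hdr, hdc⟩ := hdom
  unfold xor_process xor_process_alt two_return to_two
  simp only [PySem.List.pyRange_one]
  apply List.ext_getElem
  · simp [min_eq_left hlen]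
  · intro i h1 h2
    simp only [List.getElem_map, List.getElem_range, List.length_map, List.length_range] at h1 h2 ⊢
    have hi : i < rs.length := by simpa using h1
    have hic : i < cs.length := by omega
    have hpair : rs[i].toList.length ≤ cs[i].toList.length := by
      have := hinner ((rs.zip cs)[i]) (List.getElem_mem h2)
      simpa [List.getElem_zip] using this
    simp only [zero_add, PySem.List.pyGetD_natCast, List.getElem_zip]
    rw [List.getD_eq_getElem _ _ (by simpa using hi), List.getD_eq_getElem _ _ (by simpa using hic)]
    simp only [List.getElem_map]
    apply congrArg
    apply List.ext_getElem
    · have hp2 : rs[i].length ≤ cs[i].length := by simpa using hpair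
      simp [min_eq_left hp2]
    · intro j hj1 hj2
      simp only [List.getElem_map, List.getElem_range, List.getElem_zip, List.length_map,
        List.length_range] at hj1 hj2 ⊢
      have hjr : j < (rs[i]).toList.length := by simpa using hj1
      have hjc : j < (cs[i]).toList.length := by omega
      simp only [PySem.List.pyGetD_natCast]
      rw [List.getD_eq_getElem _ _ (by simpa using hjr), List.getD_eq_getElem _ _ (by simpa using hjc)]
      simp only [List.getElem_map]
      have ha : (rs[i]).toList[j].toNat < 128 :=
        dom_char_lt rs[i] (hdr _ (List.getElem_mem hi)) _ (List.getElem_mem hjr)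
      have hb : (cs[i]).toList[j].toNat < 128 :=
        dom_char_lt cs[i] (hdc _ (List.getElem_mem hic)) _ (List.getElem_mem hjc)
      rw [parse_replace_bin _ ha, parse_replace_bin _ hb, PySem.Int.bxor_natCast,
        parse_slice_bin _ (Nat.xor_lt_two_pow (n := 7) ha hb)]
      simp
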